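-- pv_equiv track=rewrite | github.com/tuyetnhi2609ag-lgtm/bmttnc-hutech-2380601572 | Lab03/Lab03/api.py | caesar_decrypt
-- ===== SOURCE A (Python) =====
-- def caesar_decrypt(text, key):
--     result = ""
--     key = int(key)
--
--     for char in text:
--         if char.isalpha():
--             shift = key % 26
--             if char.isupper():
--                 result += chr((ord(char) - 65 - shift) % 26 + 65)
--             else:
--                 result += chr((ord(char) - 97 - shift) % 26 + 97)
--         else:
--             result += char
--
--     return result
-- ===== SOURCE B (Python) =====
-- def caesar_decrypt(text, key):
--     shift = int(key) % 26
--     up = 'ABCDEFGHIJKLMNOPQRSTUVWXYZ'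
--     low = 'abcdefghijklmnopqrstuvwxyz'
--     table = str.maketrans(up + low,
--                           up[26 - shift:] + up[:26 - shift] +
--                           low[26 - shift:] + low[:26 - shift])
--     return text.translate(table)
-- ===== Notes on version B (the rewrite author's own statement) =====
-- stated objective: faster
-- what changed: Replaces the per-character isalpha/isupper branching loop by building a rotated-alphabet translation table once (str.maketrans on sliced alphabets) and a single text.translate call.
import Mathlib
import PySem

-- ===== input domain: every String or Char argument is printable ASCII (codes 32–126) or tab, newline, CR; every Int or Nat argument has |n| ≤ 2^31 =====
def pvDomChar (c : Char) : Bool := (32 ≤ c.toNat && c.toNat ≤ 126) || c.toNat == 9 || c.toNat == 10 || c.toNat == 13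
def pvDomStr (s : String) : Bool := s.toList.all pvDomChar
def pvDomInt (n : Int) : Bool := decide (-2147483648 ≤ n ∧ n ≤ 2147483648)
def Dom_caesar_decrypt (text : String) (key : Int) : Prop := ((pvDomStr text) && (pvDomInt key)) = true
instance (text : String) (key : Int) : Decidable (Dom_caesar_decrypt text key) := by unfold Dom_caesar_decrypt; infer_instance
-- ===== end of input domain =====

-- B builds a rotated-alphabet translation table once and translates in one pass (idiomatic); A branches per character.

-- ===== PORT A =====
-- literal transliteration of A's loop: append to result char by char
def caesar_decrypt (text : String) (key : Int) : String :=
  text.toList.foldl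
    (fun result char =>
      if PySem.Chars.isalpha char then
        let shift := PySem.Int.mod key 26
        if PySem.Chars.isupper char then
          result ++ String.singleton (Char.ofNat ((PySem.Int.mod ((char.toNat : Int) - 65 - shift) 26 + 65).toNat))
        else
          result ++ String.singleton (Char.ofNat ((PySem.Int.mod ((char.toNat : Int) - 97 - shift) 26 + 97).toNat))
      else
        result ++ String.singleton char)
    ""

-- ===== PORT B =====
-- transliteration of Source B: maketrans(from, to) is the association list (zip from to);
-- translate maps each char through the table, leaving unmapped chars unchanged.
def caesar_decrypt_alt (text : String) (key : Int) : String :=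
  let shift := PySem.Int.mod key 26
  let up := "ABCDEFGHIJKLMNOPQRSTUVWXYZ".toList
  let low := "abcdefghijklmnopqrstuvwxyz".toList
  let table := (up ++ low).zip
    (PySem.List.slice up (some (26 - shift)) none ++ PySem.List.slice up none (some (26 - shift)) ++
     PySem.List.slice low (some (26 - shift)) none ++ PySem.List.slice low none (some (26 - shift)))
  String.ofList (text.toList.map (fun c => (table.lookup c).getD c))

-- ===== PRECONDITION & SPEC =====
def Spec_caesar_decrypt (text : String) (key : Int) (out : String) : Prop := out = caesar_decrypt_alt text key
instance (text : String) (key : Int) (out : String) : Decidable (Spec_caesar_decrypt text key out) := by unfold Spec_caesar_decrypt; infer_instance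

-- ===== CLAIM (what is proved, stated in full; the proofs are below) =====
def Claim_equal_caesar_decrypt : Prop := ∀ (text : String) (key : Int), Dom_caesar_decrypt text key → Spec_caesar_decrypt text key (caesar_decrypt text key)

-- ===== LEMMAS AND PROOFS =====

-- A's per-character mapping, as a function of the shift s = key % 26
def pvMapA (s : Int) (c : Char) : Char :=
  if PySem.Chars.isalpha c then
    if PySem.Chars.isupper c then
      Char.ofNat ((PySem.Int.mod ((c.toNat : Int) - 65 - s) 26 + 65).toNat)
    else
      Char.ofNat ((PySem.Int.mod ((c.toNat : Int) - 97 - s) 26 + 97).toNat)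
  else c

-- B's per-character mapping, as a function of the shift
def pvMapB (s : Int) (c : Char) : Char :=
  let up := "ABCDEFGHIJKLMNOPQRSTUVWXYZ".toList
  let low := "abcdefghijklmnopqrstuvwxyz".toList
  let table := (up ++ low).zip
    (PySem.List.slice up (some (26 - s)) none ++ PySem.List.slice up none (some (26 - s)) ++
     PySem.List.slice low (some (26 - s)) none ++ PySem.List.slice low none (some (26 - s)))
  (table.lookup c).getD c

lemma pvFoldA (key : Int) (cs : List Char) (acc : String) :
    cs.foldl
      (fun result char =>
        if PySem.Chars.isalpha char then
          let shift := PySem.Int.mod key 26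
          if PySem.Chars.isupper char then
            result ++ String.singleton (Char.ofNat ((PySem.Int.mod ((char.toNat : Int) - 65 - shift) 26 + 65).toNat))
          else
            result ++ String.singleton (Char.ofNat ((PySem.Int.mod ((char.toNat : Int) - 97 - shift) 26 + 97).toNat))
        else
          result ++ String.singleton char) acc
    = acc ++ String.ofList (cs.map (pvMapA (PySem.Int.mod key 26))) := by
  induction cs generalizing acc with
  | nil => simp
  | cons c cs ih =>
    simp only [List.foldl_cons, List.map_cons, ih]
    have hstep : ∀ (r : String),
        (if PySem.Chars.isalpha c then
          if PySem.Chars.isupper c then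
            r ++ String.singleton (Char.ofNat ((PySem.Int.mod ((c.toNat : Int) - 65 - PySem.Int.mod key 26) 26 + 65).toNat))
          else
            r ++ String.singleton (Char.ofNat ((PySem.Int.mod ((c.toNat : Int) - 97 - PySem.Int.mod key 26) 26 + 97).toNat))
        else r ++ String.singleton c)
        = r ++ String.singleton (pvMapA (PySem.Int.mod key 26) c) := by
      intro r; unfold pvMapA; split_ifs <;> rfl
    rw [hstep,
      show (pvMapA (PySem.Int.mod key 26) c :: cs.map (pvMapA (PySem.Int.mod key 26)))
         = [pvMapA (PySem.Int.mod key 26) c] ++ cs.map (pvMapA (PySem.Int.mod key 26)) from rfl,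
      String.ofList_append, ← String.append_assoc]
    congr 1

-- the core fact, checked exhaustively over the 26 shifts and all ASCII codes
set_option maxRecDepth 40000 in
lemma pvCore : ∀ s ∈ PySem.List.pyRange 0 26 1, ∀ n ∈ List.range 128,
    pvMapA s (Char.ofNat n) = pvMapB s (Char.ofNat n) := by decide

lemma pvShiftMem (key : Int) : PySem.Int.mod key 26 ∈ PySem.List.pyRange 0 26 1 := by
  have h : PySem.Int.mod key 26 = key % 26 := PySem.Int.mod_eq_emod_of_pos (by norm_num)
  have h1 : 0 ≤ key % 26 := Int.emod_nonneg key (by norm_num)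
  have h2 : key % 26 < 26 := Int.emod_lt_of_pos key (by norm_num)
  have hr : PySem.List.pyRange 0 26 1 =
      [0,1,2,3,4,5,6,7,8,9,10,11,12,13,14,15,16,17,18,19,20,21,22,23,24,25] := by decide
  rw [h, hr]
  simp only [List.mem_cons, List.not_mem_nil, or_false]
  omega

-- ===== VERDICT (by name: the statement is the Claim_ definition above) =====
lemma pvAltEq (text : String) (key : Int) :
    caesar_decrypt_alt text key = String.ofList (text.toList.map (pvMapB (PySem.Int.mod key 26))) := rfl

theorem caesar_decrypt_spec : Claim_equal_caesar_decrypt := by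
  intro text key hdom
  unfold Spec_caesar_decrypt
  unfold caesar_decrypt
  rw [pvFoldA, pvAltEq, String.empty_append]
  congr 1
  apply List.map_congr_left
  intro c hc
  have hd : pvDomChar c = true := by
    have h := hdom
    unfold Dom_caesar_decrypt pvDomStr at h
    simp only [Bool.and_eq_true, List.all_eq_true] at h
    exact h.1 c hc
  have hlt : c.toNat ∈ List.range 128 := by
    unfold pvDomChar at hd
    simp only [Bool.or_eq_true, Bool.and_eq_true, decide_eq_true_eq, beq_iff_eq] at hd
    simp only [List.mem_range]
    omega
  have hc' : Char.ofNat c.toNat = c := Char.ofNat_toNat c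
  have hcore := pvCore (PySem.Int.mod key 26) (pvShiftMem key) c.toNat hlt
  rwa [hc'] at hcore
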